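-- pv_equiv track=rewrite | github.com/Enjef/Algo | 1900 - 1999/1979 - Find Greatest Common Divisor of Array/1979 - Find Greatest Common Divisor of Array.py | findGCD_sort
-- ===== SOURCE A (Python) =====
-- from typing import List
--
-- def findGCD_sort(nums: List[int]) -> int:  # 27.27% 18.18%
--     nums.sort()
--     n_min = nums[0]
--     n_max = nums[-1]
--     def helper(a, b):
--         for i in range(a, 0, -1):
--             if a % i == 0 and b % i == 0:
--                 return i
--     return helper(n_min, n_max)
-- ===== SOURCE B (Python) =====
-- from typing import List
--
-- def findGCD_sort(nums: List[int]) -> int: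
--     a, b = min(nums), max(nums)
--     if a <= 0:
--         raise ValueError("nums must contain positive integers")
--     while b:
--         a, b = b, a % b
--     return a
-- ===== Notes on version B (the rewrite author's own statement) =====
-- stated objective: simpler
-- what changed: Replaced the descending trial-division scan over every candidate from min(nums) down to 1 with the Euclidean algorithm (repeated modulo) on min(nums) and max(nums), and dropped the in-place sort in favour of min()/max(); B validates that the elements are positive (A silently returns None otherwise).
-- outside the precondition, e.g. on findGCD_sort([0, 3]): A returns None, B raises ValueError; on findGCD_sort([-2, 4]): A returns None, B raises ValueError
import Mathlib
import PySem

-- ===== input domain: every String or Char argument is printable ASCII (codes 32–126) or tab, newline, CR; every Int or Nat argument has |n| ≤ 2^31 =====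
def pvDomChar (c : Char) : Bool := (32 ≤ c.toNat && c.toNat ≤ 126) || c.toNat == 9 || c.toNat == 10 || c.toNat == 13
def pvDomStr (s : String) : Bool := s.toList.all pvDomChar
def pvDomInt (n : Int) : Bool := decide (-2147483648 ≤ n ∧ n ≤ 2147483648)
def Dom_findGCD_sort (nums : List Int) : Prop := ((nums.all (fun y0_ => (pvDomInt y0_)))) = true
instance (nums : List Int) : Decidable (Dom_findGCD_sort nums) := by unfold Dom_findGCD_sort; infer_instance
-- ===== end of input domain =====

-- B replaces A's descending trial-division scan with the Euclidean algorithm on min/max (simpler);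
-- A sorts nums in place while B does not: the equivalence proved here is about the return value only.


-- ===== PORT A =====
-- helper(a, b): the 'for i in range(a, 0, -1)' loop, counting i down from a; first i dividing both
-- a and b; none = the Python loop falls through (returns None)
def findGCD_sort_helper (a b i : Int) : Option Int :=
  if _h : i ≤ 0 then none
  else if PySem.Int.mod a i == 0 && PySem.Int.mod b i == 0 then some i
  else findGCD_sort_helper a b (i - 1)
termination_by i.toNat
decreasing_by omega

def findGCD_sort (nums : List Int) : Int :=
  let s := PySem.List.sorted nums (fun x => x) false
  let n_min := (PySem.List.pyGet? s 0).getD 0        -- nums[0]; Pre_ excludes the empty list (IndexError)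
  let n_max := (PySem.List.pyGet? s (-1)).getD 0     -- nums[-1]
  (findGCD_sort_helper n_min n_max n_min).getD 0           -- Pre_ excludes inputs where helper returns None

-- ===== PORT B =====
-- termination of the Euclidean loop: Python's a % b is strictly smaller in absolute value than b
lemma pyEuclid_dec (a b : Int) (h : ¬ b = 0) : (PySem.Int.mod a b).natAbs < b.natAbs := by
  rcases lt_or_gt_of_ne h with hb | hb
  · have := PySem.Int.mod_neg_bounds a hb; omega
  · have h1 := PySem.Int.mod_nonneg a hb
    have h2 := PySem.Int.mod_lt a hb
    omega

-- while b: a, b = b, a % b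
def pyEuclid (a b : Int) : Int :=
  if _h : b = 0 then a else pyEuclid b (PySem.Int.mod a b)
termination_by b.natAbs
decreasing_by exact pyEuclid_dec a b _h

def findGCD_sort_alt (nums : List Int) : Int :=
  let a := (PySem.List.min? nums (fun x => x)).getD 0   -- min(nums); Pre_ excludes the empty list (ValueError)
  let b := (PySem.List.max? nums (fun x => x)).getD 0   -- max(nums)
  if a ≤ 0 then 0                                       -- raise ValueError; Pre_ excludes these inputs
  else pyEuclid a b

-- ===== PRECONDITION & SPEC =====
-- Pre_ excludes the empty list (A raises IndexError, B raises ValueError) and lists whose minimum is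
-- ≤ 0, on which A's helper loop falls through and A returns None, not a value of the declared int
-- type (B raises ValueError there).
def Pre_findGCD_sort (nums : List Int) : Prop := nums ≠ [] ∧ ∀ x ∈ nums, 0 < x
instance (nums : List Int) : Decidable (Pre_findGCD_sort nums) := by unfold Pre_findGCD_sort; infer_instance

def pvWitness_findGCD_sort : List Int := [6, 10, 4]

def Spec_findGCD_sort (nums : List Int) (out : Int) : Prop := out = findGCD_sort_alt nums
instance (nums : List Int) (out : Int) : Decidable (Spec_findGCD_sort nums out) := by unfold Spec_findGCD_sort; infer_instance

-- ===== CLAIM (what is proved, stated in full; the proofs are below) =====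
def Claim_equal_findGCD_sort : Prop := ∀ (nums : List Int), Dom_findGCD_sort nums → Pre_findGCD_sort nums → Spec_findGCD_sort nums (findGCD_sort nums)

-- ===== LEMMAS AND PROOFS =====

-- the Euclidean loop computes the gcd of its nonnegative arguments
lemma pyEuclid_eq_gcd_aux : ∀ (n : Nat) (a b : Int), b.natAbs ≤ n → 0 ≤ a → 0 ≤ b →
    pyEuclid a b = (Int.gcd a b : Int) := by
  intro n
  induction n with
  | zero =>
    intro a b hle ha _
    have hb0 : b = 0 := by omega
    rw [pyEuclid]
    simp [hb0, Int.gcd, Int.natAbs_of_nonneg ha]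
  | succ n ih =>
    intro a b hle ha hb
    rw [pyEuclid]
    split_ifs with h
    · simp [h, Int.gcd, Int.natAbs_of_nonneg ha]
    · have hb' : 0 < b := lt_of_le_of_ne hb (Ne.symm h)
      rw [PySem.Int.mod_eq_emod_of_pos hb']
      have hr0 : 0 ≤ a % b := Int.emod_nonneg a (by omega)
      have hrlt : a % b < b := Int.emod_lt_of_pos a hb'
      rw [ih b (a % b) (by omega) hb hr0]
      congr 1
      unfold Int.gcd
      rw [Int.natAbs_emod_of_nonneg ha b]
      conv_rhs => rw [Nat.gcd_comm, Nat.gcd_rec, Nat.gcd_comm]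

-- first match of find? on a strictly descending list: the largest element satisfying the predicate
lemma find?_desc {p : Int → Bool} : ∀ {l : List Int} {g : Int},
    l.Pairwise (· > ·) → g ∈ l → p g = true →
    (∀ x ∈ l, p x = true → x ≤ g) → l.find? p = some g := by
  intro l
  induction l with
  | nil => intro g _ hg; cases hg
  | cons h t ih =>
    intro g hpair hg hpg hmax
    rcases List.mem_cons.mp hg with rfl | hgt
    · rw [List.find?_cons, hpg]
    · have hgt' : h > g := (List.pairwise_cons.mp hpair).1 g hgt
      have hph : p h = false := by
        by_contra hc
        have := hmax h (List.mem_cons_self) (by revert hc; cases p h <;> simp)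
        omega
      rw [List.find?_cons, hph]
      exact ih (List.pairwise_cons.mp hpair).2 hgt hpg
        (fun x hx hpx => hmax x (List.mem_cons_of_mem _ hx) hpx)

-- the countdown loop is find? over list(range(i, 0, -1))
lemma helper_eq_find (a b : Int) : ∀ (n : Nat) (i : Int), i.toNat ≤ n →
    findGCD_sort_helper a b i = (PySem.List.pyRange i 0 (-1)).find?
      (fun j => PySem.Int.mod a j == 0 && PySem.Int.mod b j == 0) := by
  intro n
  induction n with
  | zero =>
    intro i hle
    have hi : i ≤ 0 := by omega
    rw [findGCD_sort_helper, PySem.List.pyRange_neg_one_eq_nil hi]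
    simp [hi]
  | succ n ih =>
    intro i hle
    rw [findGCD_sort_helper]
    split_ifs with h1 h2
    · rw [PySem.List.pyRange_neg_one_eq_nil h1]; rfl
    · rw [PySem.List.pyRange_neg_one_cons (by omega), List.find?_cons, h2]
    · rw [PySem.List.pyRange_neg_one_cons (by omega), List.find?_cons,
          eq_false_of_ne_true h2, ih (i - 1) (by omega)]

-- A's trial division from a downward finds exactly gcd a b
lemma helper_eq_gcd (a b : Int) (ha : 0 < a) (_hb : 0 < b) :
    findGCD_sort_helper a b a = some (Int.gcd a b : Int) := by
  rw [helper_eq_find a b a.toNat a le_rfl]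
  have hg0 : (0:Int) < (Int.gcd a b : Int) := by
    have : Int.gcd a b ≠ 0 := by simp [Int.gcd_eq_zero_iff]; omega
    omega
  have hga : (Int.gcd a b : Int) ∣ a := Int.gcd_dvd_left a b
  have hgb : (Int.gcd a b : Int) ∣ b := Int.gcd_dvd_right a b
  have hgle : (Int.gcd a b : Int) ≤ a := Int.le_of_dvd ha hga
  apply find?_desc
  · rw [PySem.List.pyRange_neg_one_eq_reverse, List.pairwise_reverse]
    exact (PySem.List.pairwise_lt_pyRange_one _ _).imp (fun h => h)
  · exact PySem.List.mem_pyRange_neg_one.mpr ⟨hg0, hgle⟩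
  · simp [PySem.Int.mod_eq_zero_iff_dvd]
    exact ⟨hga, hgb⟩
  · intro x hx hpx
    have hx' := PySem.List.mem_pyRange_neg_one.mp hx
    simp [PySem.Int.mod_eq_zero_iff_dvd] at hpx
    have hdx : x.natAbs ∣ Int.gcd a b :=
      Nat.dvd_gcd (Int.natAbs_dvd_natAbs.mpr hpx.1) (Int.natAbs_dvd_natAbs.mpr hpx.2)
    have := Nat.le_of_dvd (by omega) hdx
    omega

-- in a ≤-sorted list every element is at most the last one
lemma le_getLast_of_pairwise : ∀ (l : List Int), l.Pairwise (· ≤ ·) →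
    ∀ (hne : l ≠ []), ∀ x ∈ l, x ≤ l.getLast hne := by
  intro l
  induction l with
  | nil => intro _ hne; cases hne rfl
  | cons a t ih =>
    intro hpair hne x hx
    rcases List.mem_cons.mp hx with rfl | hxt
    · cases t with
      | nil => simp
      | cons b u =>
        rw [List.getLast_cons (by simp)]
        have hmem := List.getLast_mem (l := b :: u) (by simp)
        exact (List.pairwise_cons.mp hpair).1 _ hmem
    · have htne : t ≠ [] := by rintro rfl; cases hxt
      rw [List.getLast_cons htne]
      exact ih (List.pairwise_cons.mp hpair).2 htne x hxt

-- ===== VERDICT (by name: the statement is the Claim_ definition above) =====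
theorem findGCD_sort_spec : Claim_equal_findGCD_sort := by
  intro nums _hdom hpre
  obtain ⟨hne, hpos⟩ := hpre
  unfold Spec_findGCD_sort findGCD_sort findGCD_sort_alt
  cases nums with
  | nil => exact absurd rfl hne
  | cons h tl =>
    rcases hs : PySem.List.sorted (h :: tl) (fun x => x) false with _ | ⟨m, t⟩
    · exact absurd ((PySem.List.sorted_eq_nil_iff _ _ _).mp hs) (by simp)
    have hmmem : m ∈ h :: tl :=
      (PySem.List.mem_sorted (h :: tl) (fun x => x) false m).mp (by rw [hs]; simp)
    have hmle : ∀ y ∈ h :: tl, m ≤ y := by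
      simpa using PySem.List.key_head_sorted_le (h :: tl) (fun x => x) hs
    -- the last element of the sorted list
    have hLpair : (m :: t).Pairwise (· ≤ ·) := by
      have := PySem.List.sorted_pairwise (h :: tl) (fun x => x)
      rw [hs] at this; simpa using this
    set L := (m :: t).getLast (by simp) with hL
    have hLmem : L ∈ h :: tl := by
      have : L ∈ m :: t := List.getLast_mem _
      exact (PySem.List.mem_sorted (h :: tl) (fun x => x) false L).mp (by rw [hs]; exact this)
    have hgeL : ∀ y ∈ h :: tl, y ≤ L := by
      intro y hy
      have hy' : y ∈ m :: t := by
        rw [← hs]; exact (PySem.List.mem_sorted (h :: tl) (fun x => x) false y).mpr hy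
      exact le_getLast_of_pairwise (m :: t) hLpair (by simp) y hy'
    -- min(nums) = m
    have hmin : tl.foldl min h = m := by
      apply le_antisymm
      · obtain ⟨h1, h2⟩ := PySem.List.foldl_min_le tl h
        rcases List.mem_cons.mp hmmem with rfl | hmem
        · exact h1
        · exact h2 m hmem
      · rcases PySem.List.foldl_min_mem tl h with he | he
        · rw [he]; exact hmle h (by simp)
        · exact hmle _ (List.mem_cons_of_mem _ he)
    -- max(nums) = L
    have hmax : tl.foldl max h = L := by
      apply le_antisymm
      · rcases PySem.List.foldl_max_mem tl h with he | he
        · rw [he]; exact hgeL h (by simp)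
        · exact hgeL _ (List.mem_cons_of_mem _ he)
      · obtain ⟨h1, h2⟩ := PySem.List.le_foldl_max tl h
        rcases List.mem_cons.mp hLmem with heq | hmem
        · exact heq ▸ h1
        · exact h2 L hmem
    have hm0 : 0 < m := hpos m hmmem
    have hL0 : 0 < L := hpos L hLmem
    simp only [PySem.List.min?_id_cons, PySem.List.max?_id_cons, hmin, hmax,
      PySem.List.pyGet?_zero_cons, PySem.List.pyGet?_neg_one, Option.getD_some]
    rw [List.getLast?_eq_some_getLast (by simp), ← hL, Option.getD_some]
    rw [if_neg (by omega)]
    rw [helper_eq_gcd m L hm0 hL0, Option.getD_some,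
        pyEuclid_eq_gcd_aux L.natAbs m L le_rfl hm0.le hL0.le]
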